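-- pv_equiv track=rewrite | github.com/StativaCamelia/Criptografie | TEMA5/attackBirthday.py | prepocesare
-- ===== SOURCE A (Python) =====
-- def prepocesare(message):
--     # transform mesajul in binar
--     bytes_text = ''.join(['{0:08b}'.format(ord(i)) for i in message])
--     pad_bits = bytes_text + "1"
--     lenght = len(pad_bits)
--     while len(pad_bits)%512 != 448:
--         pad_bits += "0"
--     #adauga dimensiunea mesajului ca 64 de bits(big-endian)
--     pad_bits += '{0:064b}'.format(lenght - 1 )
--     return pad_bits
-- ===== SOURCE B (Python) =====
-- def prepocesare(message):
--     # transform mesajul in binar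
--     bytes_text = ''.join('{0:08b}'.format(ord(c)) for c in message)
--     pad_bits = bytes_text + "1"
--     lenght = len(pad_bits)
--     # closed-form padding: pad with zeros up to 448 mod 512 in one step
--     pad_bits += "0" * ((448 - lenght) % 512)
--     # adauga dimensiunea mesajului ca 64 de bits (big-endian)
--     pad_bits += '{0:064b}'.format(lenght - 1)
--     return pad_bits
-- ===== Notes on version B (the rewrite author's own statement) =====
-- stated objective: simpler
-- what changed: Replaces the while loop that appends one zero character per iteration until len % 512 == 448 by the closed-form pad count (448 - lenght) % 512 and a single string multiply.
import Mathlib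
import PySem

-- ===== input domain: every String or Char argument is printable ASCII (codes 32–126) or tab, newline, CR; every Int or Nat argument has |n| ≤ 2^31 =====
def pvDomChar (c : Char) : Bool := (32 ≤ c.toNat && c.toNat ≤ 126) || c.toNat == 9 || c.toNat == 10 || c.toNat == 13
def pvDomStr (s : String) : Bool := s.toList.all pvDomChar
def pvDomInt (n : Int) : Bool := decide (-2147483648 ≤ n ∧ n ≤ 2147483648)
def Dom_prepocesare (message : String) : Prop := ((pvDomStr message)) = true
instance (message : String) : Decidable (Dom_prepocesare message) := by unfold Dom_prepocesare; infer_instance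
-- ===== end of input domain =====

-- B replaces A's one-zero-at-a-time padding while-loop by the closed-form pad length (448 - len) % 512 (simpler).

-- '{0:0<w>b}'.format(n): fixed-width big-endian binary; exact for n < 2^w (Dom gives char codes < 256 and the length fits 64 bits for claimed inputs)
def pvBin (width n : Nat) : List Char :=
  (List.range width).map (fun i => if n.testBit (width - 1 - i) then '1' else '0')

-- ===== PORT A =====
-- the while loop: append '0' until length % 512 == 448
def pvPadLoop (s : List Char) : List Char :=
  if s.length % 512 ≠ 448 then pvPadLoop (s ++ ['0']) else s
termination_by ((448 - (s.length : Int)) % 512).toNat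
decreasing_by simp only [List.length_append, List.length_cons, List.length_nil]; omega

def prepocesare (message : String) : String :=
  let bytes_text := message.toList.flatMap (fun c => pvBin 8 c.toNat)
  let pad_bits := bytes_text ++ ['1']
  let lenght := pad_bits.length
  let padded := pvPadLoop pad_bits
  String.mk (padded ++ pvBin 64 (lenght - 1))

-- ===== PORT B =====
def prepocesare_alt (message : String) : String :=
  let bytes_text := message.toList.flatMap (fun c => pvBin 8 c.toNat)
  let pad_bits := bytes_text ++ ['1']
  let lenght := pad_bits.length
  let needed := PySem.Int.mod (448 - (lenght : Int)) 512
  String.mk (pad_bits ++ List.replicate needed.toNat '0' ++ pvBin 64 (lenght - 1))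

-- ===== PRECONDITION & SPEC =====
def Spec_prepocesare (message : String) (out : String) : Prop := out = prepocesare_alt message
instance (message : String) (out : String) : Decidable (Spec_prepocesare message out) := by unfold Spec_prepocesare; infer_instance

-- ===== CLAIM (what is proved, stated in full; the proofs are below) =====
def Claim_equal_prepocesare : Prop := ∀ (message : String), Dom_prepocesare message → Spec_prepocesare message (prepocesare message)

-- ===== LEMMAS AND PROOFS =====
theorem pvPadLoop_closed (s : List Char) :
    pvPadLoop s = s ++ List.replicate (PySem.Int.mod (448 - (s.length : Int)) 512).toNat '0' := by
  induction s using pvPadLoop.induct with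
  | case1 s h ih =>
      rw [pvPadLoop, if_pos h, ih]
      have hlen : (s ++ ['0']).length = s.length + 1 := by simp
      rw [hlen]
      rw [PySem.Int.mod_eq_emod_of_pos (a := 448 - (s.length : Int)) (b := 512) (by norm_num),
        PySem.Int.mod_eq_emod_of_pos (a := 448 - ((s.length + 1 : Nat) : Int)) (b := 512) (by norm_num)]
      have hmod : ((448 - (s.length : Int)) % 512).toNat
          = ((448 - ((s.length + 1 : Nat) : Int)) % 512).toNat + 1 := by push_cast; omega
      rw [hmod]
      simp [List.replicate_succ, List.append_assoc]
  | case2 s h =>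
      rw [pvPadLoop, if_neg h]
      have h448 : s.length % 512 = 448 := by omega
      rw [PySem.Int.mod_eq_emod_of_pos (a := 448 - (s.length : Int)) (b := 512) (by norm_num)]
      have hz : ((448 - (s.length : Int)) % 512).toNat = 0 := by omega
      simp [hz]

theorem prepocesare_eq (message : String) : prepocesare message = prepocesare_alt message := by
  simp only [prepocesare, prepocesare_alt, pvPadLoop_closed, List.append_assoc]

-- ===== VERDICT (by name: the statement is the Claim_ definition above) =====
theorem prepocesare_spec : Claim_equal_prepocesare := by
  intro message _
  unfold Spec_prepocesare
  exact prepocesare_eq message
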